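-- pv_equiv track=rewrite | github.com/abhishek2024/Chatbot-Deep-Learning | deeppavlov/dataset_readers/ne_parser.py | word_indexi_to_spans
-- ===== SOURCE A (Python) =====
-- from typing import List, Tuple, Callable, Iterable, Union, Dict, Optional
--
-- def word_indexi_to_spans(text: str, word_spans: List[Tuple[str, int, int]], subs_map=None):
--     if subs_map is None:
--         subs_map = {}
--
--     wi = 0
--
--     words = [ws[0] for ws in word_spans]
--     word_origs = [subs_map.get(w, w) for w in words]
--     words_span = []
--
--     i = 0
--     while i < len(text) and wi < len(words):
--         if text[i:].startswith(word_origs[wi]):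
--             words_span.append((words[wi], i, i+len(word_origs[wi])))
--             i += len(word_origs[wi])
--             wi += 1
--             continue
--         i += 1
--
--     return words_span
-- ===== SOURCE B (Python) =====
-- def word_indexi_to_spans(text, word_spans, subs_map=None):
--     if subs_map is None:
--         subs_map = {}
--     spans = []
--     pos = 0
--     for ws in word_spans:
--         word = ws[0]
--         if pos >= len(text):
--             break
--         orig = subs_map.get(word, word)
--         j = text.find(orig, pos)
--         if j == -1:
--             break
--         spans.append((word, j, j + len(orig)))
--         pos = j + len(orig)
--     return spans
-- ===== Notes on version B (the rewrite author's own statement) =====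
-- stated objective: idiomatic
-- what changed: Replaced A's explicit character-by-character cursor scan (advancing i by 1 and testing startswith at every position) with the idiomatic per-word substring search: one text.find(orig, pos) call per word, advancing the cursor past each match.
import Mathlib
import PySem

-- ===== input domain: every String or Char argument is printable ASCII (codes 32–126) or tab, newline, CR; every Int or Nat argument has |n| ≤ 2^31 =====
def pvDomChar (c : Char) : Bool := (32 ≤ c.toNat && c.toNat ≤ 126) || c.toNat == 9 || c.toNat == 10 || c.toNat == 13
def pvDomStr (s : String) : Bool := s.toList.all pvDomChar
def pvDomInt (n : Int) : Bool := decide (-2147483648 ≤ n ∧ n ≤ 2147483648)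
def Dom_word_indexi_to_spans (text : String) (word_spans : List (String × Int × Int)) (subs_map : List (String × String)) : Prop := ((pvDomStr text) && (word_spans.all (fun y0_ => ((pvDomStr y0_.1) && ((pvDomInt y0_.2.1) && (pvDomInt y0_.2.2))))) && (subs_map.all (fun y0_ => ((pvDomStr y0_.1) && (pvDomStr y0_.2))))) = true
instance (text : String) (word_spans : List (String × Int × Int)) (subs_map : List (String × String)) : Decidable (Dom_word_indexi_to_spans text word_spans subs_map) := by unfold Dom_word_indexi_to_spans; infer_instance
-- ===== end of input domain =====

-- B replaces A's character-by-character scan with one substring search (str.find) per word,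
-- keeping a cursor; objective: idiomatic/simpler (return value proved equal; no mutation involved).

-- ===== PORT A =====
-- A's while loop: i scans the text one char at a time, wi indexes the word list.
-- fuel = t.length + words.length bounds the loop's step count; it only makes the
-- recursion structural and never runs out on the initial call (proved in the lemmas).
def pvAloop (t : List Char) (words origs : List String) (fuel wi i : Nat)
    (acc : List (String × Int × Int)) : List (String × Int × Int) :=
  match fuel with
  | 0 => acc
  | fuel + 1 =>
    if i < t.length ∧ wi < words.length then
      let o := (origs.getD wi "").toList
      if PySem.Chars.startswith (PySem.List.slice t (some (i : Int)) none) o then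
        pvAloop t words origs fuel (wi + 1) (i + o.length)
          (acc ++ [(words.getD wi "", (i : Int), (i : Int) + (o.length : Int))])
      else
        pvAloop t words origs fuel wi (i + 1) acc
    else acc

def word_indexi_to_spans (text : String) (word_spans : List (String × Int × Int)) (subs_map : List (String × String)) : List (String × Int × Int) :=
  let subs := PySem.Dict.mk subs_map
  let words := word_spans.map (fun ws => ws.1)
  let word_origs := words.map (fun w => subs.getD w w)
  pvAloop text.toList words word_origs (text.toList.length + words.length) 0 0 []

-- ===== PORT B =====
-- B's for loop: cursor pos, one text.find(orig, pos) per word.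
def pvBloop (t : List Char) (subs : PySem.Dict String String)
    (ws : List (String × Int × Int)) (pos : Nat) : List (String × Int × Int) :=
  match ws with
  | [] => []
  | x :: rest =>
    let word := x.1
    if pos < t.length then
      let o := (subs.getD word word).toList
      let j := PySem.Chars.findFrom t o pos none
      if j = -1 then []
      else (word, j, j + (o.length : Int)) :: pvBloop t subs rest (j.toNat + o.length)
    else []

def word_indexi_to_spans_alt (text : String) (word_spans : List (String × Int × Int)) (subs_map : List (String × String)) : List (String × Int × Int) :=
  pvBloop text.toList (PySem.Dict.mk subs_map) word_spans 0

-- ===== PRECONDITION & SPEC =====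
def Spec_word_indexi_to_spans (text : String) (word_spans : List (String × Int × Int)) (subs_map : List (String × String)) (out : List (String × Int × Int)) : Prop := out = word_indexi_to_spans_alt text word_spans subs_map
instance (text : String) (word_spans : List (String × Int × Int)) (subs_map : List (String × String)) (out : List (String × Int × Int)) : Decidable (Spec_word_indexi_to_spans text word_spans subs_map out) := by unfold Spec_word_indexi_to_spans; infer_instance

-- ===== CLAIM (what is proved, stated in full; the proofs are below) =====
def Claim_equal_word_indexi_to_spans : Prop := ∀ (text : String) (word_spans : List (String × Int × Int)) (subs_map : List (String × String)), Dom_word_indexi_to_spans text word_spans subs_map → Spec_word_indexi_to_spans text word_spans subs_map (word_indexi_to_spans text word_spans subs_map)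

-- ===== LEMMAS AND PROOFS =====

-- A's scan, rephrased as structural recursion on the (word, orig) pair list (proof helper).
def auxA (t : List Char) (ps : List (String × String)) (i : Nat) : List (String × Int × Int) :=
  match ps with
  | [] => []
  | (w, o) :: rest =>
    if h : i < t.length then
      if PySem.Chars.startswith (t.drop i) o.toList then
        (w, (i : Int), (i : Int) + (o.toList.length : Int)) :: auxA t rest (i + o.toList.length)
      else auxA t ((w, o) :: rest) (i + 1)
    else []
termination_by (t.length - i) + ps.length
decreasing_by all_goals simp_all; omega

lemma auxA_of_le (t : List Char) (ps : List (String × String)) (i : Nat)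
    (h : t.length ≤ i) : auxA t ps i = [] := by
  match ps with
  | [] => rw [auxA]
  | (w, o) :: rest => rw [auxA, dif_neg (by omega)]

lemma auxA_nil (t : List Char) (i : Nat) : auxA t [] i = [] := by rw [auxA]

lemma pvAloop_eq_auxA (t : List Char) (g : String → String) :
    ∀ n words wi i acc, (t.length - i) + (words.length - wi) ≤ n →
      pvAloop t words (words.map g) n wi i acc
        = acc ++ auxA t ((words.drop wi).map (fun w => (w, g w))) i := by
  intro n
  induction n with
  | zero =>
    intro words wi i acc hm
    rw [pvAloop, auxA_of_le _ _ _ (by omega)]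
    simp
  | succ n ih =>
    intro words wi i acc hm
    rw [pvAloop]
    by_cases h1 : i < t.length
    · by_cases h2 : wi < words.length
      · have hd : words.drop wi = words[wi] :: words.drop (wi + 1) :=
          List.drop_eq_getElem_cons h2
        have hgo : (words.map g).getD wi "" = g words[wi] := by
          rw [List.getD_eq_getElem _ _ (by simpa using h2), List.getElem_map]
        have hgw : words.getD wi "" = words[wi] := List.getD_eq_getElem _ _ h2
        have hsl : PySem.List.slice t (some (i : Int)) none = t.drop i :=
          PySem.List.slice_from_natCast t i
        rw [if_pos (⟨h1, h2⟩ : i < t.length ∧ wi < words.length)]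
        simp only [hgo, hgw, hsl]
        rw [hd, List.map_cons, auxA, dif_pos h1]
        by_cases hs : PySem.Chars.startswith (t.drop i) (g words[wi]).toList = true
        · have hrec := ih words (wi + 1) (i + (g words[wi]).toList.length)
            (acc ++ [(words[wi], (i : Int), (i : Int) + ((g words[wi]).toList.length : Int))])
            (by omega)
          rw [if_pos hs, if_pos hs, hrec]
          simp
        · have hrec := ih words wi (i + 1) acc (by omega)
          rw [if_neg hs, if_neg hs, hrec, hd, List.map_cons]
      · rw [if_neg (fun h => h2 h.2), List.drop_eq_nil_of_le (by omega), List.map_nil,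
          auxA_nil]
        simp
    · rw [if_neg (fun h => h1 h.1), auxA_of_le _ _ _ (by omega)]
      simp

lemma auxA_cons (t : List Char) :
    ∀ n i, t.length - i ≤ n → i ≤ t.length → ∀ (w o : String) rest,
      auxA t ((w, o) :: rest) i =
        if i < t.length then
          (if PySem.Chars.findFrom t o.toList (i : Int) none = -1 then []
           else ((w, PySem.Chars.findFrom t o.toList (i : Int) none,
                   PySem.Chars.findFrom t o.toList (i : Int) none + (o.toList.length : Int)) ::
                 auxA t rest ((PySem.Chars.findFrom t o.toList (i : Int) none).toNat + o.toList.length)))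
        else [] := by
  intro n
  induction n with
  | zero =>
    intro i hm hi w o rest
    have h1 : ¬ i < t.length := by omega
    rw [auxA_of_le _ _ _ (by omega), if_neg h1]
  | succ n ih =>
    intro i hm hi w o rest
    by_cases h1 : i < t.length
    · rw [auxA, dif_pos h1, if_pos h1]
      by_cases hs : PySem.Chars.startswith (t.drop i) o.toList = true
      · -- match at i: findFrom returns i
        have hpref : o.toList <+: t.drop i := (PySem.Chars.startswith_iff _ _).mp hs
        have hne : PySem.Chars.findFrom t o.toList (i : Int) none ≠ -1 := by
          rw [Ne, PySem.Chars.findFrom_natCast_eq_neg_one_iff t o.toList i hi]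
          exact fun h => h hpref.isInfix
        obtain ⟨hge, hp, hmin⟩ := PySem.Chars.findFrom_natCast_spec t o.toList i hi hne
        have hj : PySem.Chars.findFrom t o.toList (i : Int) none = (i : Int) := by
          by_contra hne2
          have hlt : i < (PySem.Chars.findFrom t o.toList (i : Int) none).toNat := by omega
          exact hmin i le_rfl hlt hpref
        rw [if_pos hs, if_neg hne, hj]
        simp
      · -- no match at i: step to i + 1
        rw [if_neg hs]
        have hnp : ¬ o.toList <+: t.drop i := fun h =>
          hs ((PySem.Chars.startswith_iff _ _).mpr h)
        have honil : o.toList ≠ [] := by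
          intro h; exact hnp (h ▸ List.nil_prefix)
        rw [ih (i + 1) (by omega) (by omega) w o rest]
        by_cases h2 : i + 1 < t.length
        · rw [if_pos h2]
          -- findFrom from i equals findFrom from i + 1
          have hkey : PySem.Chars.findFrom t o.toList (i : Int) none
              = PySem.Chars.findFrom t o.toList ((i + 1 : Nat) : Int) none := by
            by_cases hne2 : PySem.Chars.findFrom t o.toList ((i + 1 : Nat) : Int) none = -1
            · rw [hne2]
              rw [PySem.Chars.findFrom_natCast_eq_neg_one_iff t o.toList i hi]
              rw [PySem.Chars.findFrom_natCast_eq_neg_one_iff t o.toList (i + 1) (by omega)] at hne2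
              intro hinf
              apply hne2
              obtain ⟨m, hm2⟩ := (PySem.Chars.exists_prefix_drop_iff_isIn o.toList (t.drop i)).mpr
                ((PySem.Chars.isIn_iff_infix _ _).mpr hinf)
              rw [List.drop_drop] at hm2
              rcases Nat.eq_zero_or_pos m with hm0 | hmpos
              · exact absurd (by simpa [hm0] using hm2) hnp
              · apply (PySem.Chars.isIn_iff_infix _ _).mp
                apply (PySem.Chars.exists_prefix_drop_iff_isIn _ _).mp
                refine ⟨m - 1, ?_⟩
                rw [List.drop_drop]
                have heq : i + 1 + (m - 1) = i + m := by omega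
                rw [heq]
                exact hm2
            · obtain ⟨hge2, hp2, hmin2⟩ :=
                PySem.Chars.findFrom_natCast_spec t o.toList (i + 1) (by omega) hne2
              set j2 := PySem.Chars.findFrom t o.toList ((i + 1 : Nat) : Int) none with hj2def
              have hne1 : PySem.Chars.findFrom t o.toList (i : Int) none ≠ -1 := by
                rw [Ne, PySem.Chars.findFrom_natCast_eq_neg_one_iff t o.toList i hi]
                intro hninf
                apply hninf
                apply (PySem.Chars.isIn_iff_infix _ _).mp
                apply (PySem.Chars.exists_prefix_drop_iff_isIn _ _).mp
                refine ⟨j2.toNat - i, ?_⟩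
                rw [List.drop_drop]
                have heq : i + (j2.toNat - i) = j2.toNat := by omega
                rw [heq]
                exact hp2
              obtain ⟨hge1, hp1, hmin1⟩ :=
                PySem.Chars.findFrom_natCast_spec t o.toList i hi hne1
              set j1 := PySem.Chars.findFrom t o.toList (i : Int) none with hj1def
              have hj1i : j1.toNat ≠ i := by
                intro h; exact hnp (h ▸ hp1)
              have hj1ge : i + 1 ≤ j1.toNat := by omega
              have h12 : ¬ j1.toNat < j2.toNat := fun h => hmin2 j1.toNat hj1ge h hp1
              have h21 : ¬ j2.toNat < j1.toNat := fun h => hmin1 j2.toNat (by omega) h hp2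
              omega
          rw [hkey]
        · -- i + 1 = len: no match possible anywhere ≥ i
          rw [if_neg h2]
          have hne1 : PySem.Chars.findFrom t o.toList (i : Int) none = -1 := by
            by_contra hne1
            obtain ⟨hge1, hp1, hmin1⟩ :=
              PySem.Chars.findFrom_natCast_spec t o.toList i hi hne1
            set j1 := PySem.Chars.findFrom t o.toList (i : Int) none with hj1def
            have hlt : j1.toNat < t.length := by
              have hle := hp1.length_le
              rw [List.length_drop] at hle
              have : o.toList.length ≠ 0 := fun h => honil (List.eq_nil_of_length_eq_zero h)
              omega
            have heq : j1.toNat = i := by omega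
            exact hnp (heq ▸ hp1)
          rw [if_pos hne1]
    · rw [auxA_of_le _ _ _ (by omega), if_neg h1]

lemma auxA_eq_pvBloop (t : List Char) (subs : PySem.Dict String String) :
    ∀ (ws : List (String × Int × Int)) (pos : Nat), pos ≤ t.length →
      auxA t (ws.map (fun x => (x.1, subs.getD x.1 x.1))) pos = pvBloop t subs ws pos := by
  intro ws
  induction ws with
  | nil =>
    intro pos hpos
    rw [List.map_nil, auxA_nil, pvBloop]
  | cons x rest ih =>
    intro pos hpos
    rw [List.map_cons, auxA_cons t (t.length - pos) pos le_rfl hpos, pvBloop]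
    by_cases h1 : pos < t.length
    · rw [if_pos h1, if_pos h1]
      set o := (subs.getD x.1 x.1).toList with ho
      by_cases hne : PySem.Chars.findFrom t o (pos : Int) none = -1
      · rw [if_pos hne, if_pos hne]
      · rw [if_neg hne, if_neg hne]
        obtain ⟨hge, hp, hmin⟩ := PySem.Chars.findFrom_natCast_spec t o pos hpos hne
        set j := PySem.Chars.findFrom t o (pos : Int) none with hj
        have hle := hp.length_le
        rw [List.length_drop] at hle
        have hjle : j.toNat + o.length ≤ t.length := by
          rcases Nat.eq_zero_or_pos o.length with h0 | hpos2
          · have hji : j = (pos : Int) := by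
              by_contra hne2
              exact hmin pos le_rfl (by omega) (by simp [List.eq_nil_of_length_eq_zero h0])
            omega
          · omega
        rw [ih (j.toNat + o.length) hjle]
    · rw [if_neg h1, if_neg h1]

-- ===== VERDICT (by name: the statement is the Claim_ definition above) =====
theorem word_indexi_to_spans_spec : Claim_equal_word_indexi_to_spans := by
  intro text word_spans subs_map _
  unfold Spec_word_indexi_to_spans word_indexi_to_spans word_indexi_to_spans_alt
  show pvAloop text.toList (word_spans.map (fun ws => ws.1))
      ((word_spans.map (fun ws => ws.1)).map (fun w => (PySem.Dict.mk subs_map).getD w w))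
      (text.toList.length + (word_spans.map (fun ws => ws.1)).length) 0 0 []
    = pvBloop text.toList (PySem.Dict.mk subs_map) word_spans 0
  rw [List.length_map]
  rw [pvAloop_eq_auxA text.toList
      (fun w => (PySem.Dict.mk subs_map).getD w w) (text.toList.length + word_spans.length)
      (word_spans.map (fun ws => ws.1)) 0 0 [] (by simp)]
  rw [List.drop_zero, List.map_map]
  have hfun : (((fun w => (w, (PySem.Dict.mk subs_map).getD w w)) ∘ fun ws => ws.1) :
      (String × Int × Int) → String × String)
      = fun x => (x.1, (PySem.Dict.mk subs_map).getD x.1 x.1) := rfl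
  rw [hfun, auxA_eq_pvBloop text.toList (PySem.Dict.mk subs_map) word_spans 0 (Nat.zero_le _)]
  simp
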